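-- pv_equiv track=rewrite | github.com/Ricky-84/LEGALS-BNS-Legal-Advisory-System | backend/app/services/neo4j_service.py | _has_extortion_elements
-- ===== SOURCE A (Python) =====
-- from typing import List, Dict, Any, Optional
--
-- def _has_extortion_elements(entities: Dict[str, List[str]]) -> bool:
--     """Check if entities indicate extortion"""
--     actions = entities.get("actions", [])
--     circumstances = entities.get("circumstances", [])
--     intentions = entities.get("intentions", [])
--     methods = entities.get("methods", [])
--
--     # Extortion-specific indicators (including semantic mappings)
--     threat_actions = ["threatened", "blackmailed", "intimidated", "coerced", "forced", "demanded", "extorted", "pressured", "warned", "told"]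
--     threat_methods = ["violence", "harm", "exposure", "reputation damage", "legal action", "physical harm"]
--     threat_circumstances = ["under threat", "fear", "pressure", "demanding money", "pay or else"]
--     threat_objects = ["money", "property", "compliance", "silence", "cooperation"]
--
--     # Check all entity types for threat indicators
--     all_text = " ".join(actions + circumstances + intentions + methods).lower()
--
--     has_threat_action = any(threat_action.lower() in action.lower() for action in actions for threat_action in threat_actions)
--     has_threat_method = any(threat_method.lower() in method.lower() for method in methods for threat_method in threat_methods)
--     has_threat_circumstance = any(threat_circ.lower() in circumstance.lower() for circumstance in circumstances for threat_circ in threat_circumstances)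
--
--     # Also check for threat patterns in combined text
--     has_threat_pattern = any(pattern in all_text for pattern in threat_actions + threat_methods + threat_circumstances)
--
--     # Extortion requires threat indicators
--     return has_threat_action or has_threat_method or has_threat_circumstance or has_threat_pattern
-- ===== SOURCE B (Python) =====
-- from typing import List, Dict, Any, Optional
--
-- def _has_extortion_elements(entities: Dict[str, List[str]]) -> bool:
--     """Check if entities indicate extortion.
--
--     Every per-type check in the original is subsumed by its combined-text
--     pattern check, so a single scan of the joined text against one flattened
--     pattern list gives the same answer."""
--     threat_patterns = [
--         "threatened", "blackmailed", "intimidated", "coerced", "forced", "demanded", "extorted", "pressured", "warned", "told",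
--         "violence", "harm", "exposure", "reputation damage", "legal action", "physical harm",
--         "under threat", "fear", "pressure", "demanding money", "pay or else",
--     ]
--     all_text = " ".join(
--         entities.get("actions", []) + entities.get("circumstances", [])
--         + entities.get("intentions", []) + entities.get("methods", [])
--     ).lower()
--     return any(pattern in all_text for pattern in threat_patterns)
-- ===== Notes on version B (the rewrite author's own statement) =====
-- stated objective: simpler
-- what changed: B replaces A's four separate checks (three nested per-type keyword loops plus a combined-text scan) by the single combined-text scan over one flattened pattern list, which subsumes the per-type loops; the dead threat_objects list is dropped.
import Mathlib
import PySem

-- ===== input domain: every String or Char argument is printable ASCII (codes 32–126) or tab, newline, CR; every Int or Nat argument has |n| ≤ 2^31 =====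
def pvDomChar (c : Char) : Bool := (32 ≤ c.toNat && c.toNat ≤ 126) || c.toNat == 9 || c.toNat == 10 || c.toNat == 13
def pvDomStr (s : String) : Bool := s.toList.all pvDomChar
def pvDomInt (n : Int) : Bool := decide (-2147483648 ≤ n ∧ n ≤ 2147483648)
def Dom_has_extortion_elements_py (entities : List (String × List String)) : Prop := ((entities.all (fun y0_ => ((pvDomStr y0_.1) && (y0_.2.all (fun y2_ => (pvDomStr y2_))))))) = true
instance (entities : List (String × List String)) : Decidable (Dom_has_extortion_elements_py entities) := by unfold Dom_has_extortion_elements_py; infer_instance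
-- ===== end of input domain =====

-- B: the three per-type keyword loops of A are each subsumed by A's combined-text scan,
-- so B performs only that single scan over one flattened pattern list (simpler decomposition).


-- ===== PORT A =====
def pvThreatActions : List String := ["threatened", "blackmailed", "intimidated", "coerced", "forced", "demanded", "extorted", "pressured", "warned", "told"]
def pvThreatMethods : List String := ["violence", "harm", "exposure", "reputation damage", "legal action", "physical harm"]
def pvThreatCircumstances : List String := ["under threat", "fear", "pressure", "demanding money", "pay or else"]

-- A's threat_objects list is defined but never used in A; it is not ported.
def has_extortion_elements_py (entities : List (String × List String)) : Bool :=
  let actions := PySem.Dict.getD (PySem.Dict.mk entities) "actions" []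
  let circumstances := PySem.Dict.getD (PySem.Dict.mk entities) "circumstances" []
  let intentions := PySem.Dict.getD (PySem.Dict.mk entities) "intentions" []
  let methods := PySem.Dict.getD (PySem.Dict.mk entities) "methods" []
  let all_text := PySem.Str.lower (PySem.Str.join " " (actions ++ circumstances ++ intentions ++ methods))
  let has_threat_action := actions.any (fun action => pvThreatActions.any (fun ta => PySem.Str.isIn (PySem.Str.lower ta) (PySem.Str.lower action)))
  let has_threat_method := methods.any (fun m => pvThreatMethods.any (fun tm => PySem.Str.isIn (PySem.Str.lower tm) (PySem.Str.lower m)))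
  let has_threat_circumstance := circumstances.any (fun c => pvThreatCircumstances.any (fun tc => PySem.Str.isIn (PySem.Str.lower tc) (PySem.Str.lower c)))
  let has_threat_pattern := (pvThreatActions ++ pvThreatMethods ++ pvThreatCircumstances).any (fun pattern => PySem.Str.isIn pattern all_text)
  has_threat_action || has_threat_method || has_threat_circumstance || has_threat_pattern

-- ===== PORT B =====
def pvThreatPatterns : List String :=
  ["threatened", "blackmailed", "intimidated", "coerced", "forced", "demanded", "extorted", "pressured", "warned", "told",
   "violence", "harm", "exposure", "reputation damage", "legal action", "physical harm",
   "under threat", "fear", "pressure", "demanding money", "pay or else"]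

def has_extortion_elements_py_alt (entities : List (String × List String)) : Bool :=
  let all_text := PySem.Str.lower (PySem.Str.join " "
    (PySem.Dict.getD (PySem.Dict.mk entities) "actions" [] ++ PySem.Dict.getD (PySem.Dict.mk entities) "circumstances" []
      ++ PySem.Dict.getD (PySem.Dict.mk entities) "intentions" [] ++ PySem.Dict.getD (PySem.Dict.mk entities) "methods" []))
  pvThreatPatterns.any (fun pattern => PySem.Str.isIn pattern all_text)

-- ===== PRECONDITION & SPEC =====
def Spec_has_extortion_elements_py (entities : List (String × List String)) (out : Bool) : Prop := out = has_extortion_elements_py_alt entities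
instance (entities : List (String × List String)) (out : Bool) : Decidable (Spec_has_extortion_elements_py entities out) := by unfold Spec_has_extortion_elements_py; infer_instance

-- ===== CLAIM (what is proved, stated in full; the proofs are below) =====
def Claim_equal_has_extortion_elements_py : Prop := ∀ (entities : List (String × List String)), Dom_has_extortion_elements_py entities → Spec_has_extortion_elements_py entities (has_extortion_elements_py entities)

-- ===== LEMMAS AND PROOFS =====

-- a list member is an infix of the intercalation
theorem pv_mem_infix_intercalate {α : Type} (s x : List α) (t : List (List α)) (h : x ∈ t) :
    x <:+: List.intercalate s t := by
  induction t with
  | nil => simp at h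
  | cons a t ih =>
    rcases List.mem_cons.mp h with h | h
    · subst h
      cases t with
      | nil => simp [List.intercalate]
      | cons b t =>
        have e : List.intercalate s (x::b::t) = x ++ (s ++ List.intercalate s (b::t)) := by
          simp [List.intercalate, List.intersperse]
        rw [e]; exact List.infix_append [] x _
    · cases t with
      | nil => simp at h
      | cons b t =>
        have e : List.intercalate s (a::b::t) = (a ++ s) ++ List.intercalate s (b::t) := by
          simp [List.intercalate, List.intersperse]
        rw [e]
        exact (ih h).trans ⟨a ++ s, [], by simp⟩

-- a per-type nested keyword scan implies the combined-text scan, when the keywords are already lowercase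
theorem pv_subsumed (parts xs pats : List String)
    (hlow : ∀ q ∈ pats, PySem.Str.lower q = q) (hsub : xs ⊆ parts)
    (h : xs.any (fun x => pats.any (fun q => PySem.Str.isIn (PySem.Str.lower q) (PySem.Str.lower x))) = true) :
    ∃ q ∈ pats, PySem.Str.isIn q (PySem.Str.lower (PySem.Str.join " " parts)) = true := by
  rcases List.any_eq_true.mp h with ⟨x, hx, hx2⟩
  rcases List.any_eq_true.mp hx2 with ⟨q, hq, hqin⟩
  refine ⟨q, hq, ?_⟩
  rw [hlow q hq] at hqin
  rw [PySem.Str.isIn_iff_infix] at hqin ⊢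
  have h1 : x.toList <:+: (PySem.Str.join " " parts).toList := by
    rw [PySem.Str.toList_join]
    exact pv_mem_infix_intercalate _ _ _ (List.mem_map_of_mem (hsub hx))
  have h2 : (PySem.Str.lower x).toList <:+: (PySem.Str.lower (PySem.Str.join " " parts)).toList := by
    rw [PySem.Str.toList_lower, PySem.Str.toList_lower]
    exact List.IsInfix.map _ h1
  exact hqin.trans h2

theorem pv_or_absorb (a b c p : Bool) (ha : a = true → p = true) (hb : b = true → p = true)
    (hc : c = true → p = true) : (a || b || c || p) = p := by
  cases a <;> cases b <;> cases c <;> cases p <;> simp_all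

-- ===== VERDICT (by name: the statement is the Claim_ definition above) =====
theorem has_extortion_elements_py_spec : Claim_equal_has_extortion_elements_py := by
  intro entities _
  unfold Spec_has_extortion_elements_py has_extortion_elements_py has_extortion_elements_py_alt
  simp only
  set actions := PySem.Dict.getD (PySem.Dict.mk entities) "actions" ([] : List String) with hA
  set circumstances := PySem.Dict.getD (PySem.Dict.mk entities) "circumstances" ([] : List String) with hC
  set intentions := PySem.Dict.getD (PySem.Dict.mk entities) "intentions" ([] : List String) with hI
  set methods := PySem.Dict.getD (PySem.Dict.mk entities) "methods" ([] : List String) with hM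
  set parts := actions ++ circumstances ++ intentions ++ methods with hP
  have hflat : pvThreatPatterns = pvThreatActions ++ pvThreatMethods ++ pvThreatCircumstances := rfl
  rw [hflat]
  apply pv_or_absorb
  · intro h
    rcases pv_subsumed parts actions pvThreatActions (by decide)
      (by rw [hP]; intro z hz; simp [hz]) h with ⟨q, hq, hqt⟩
    exact List.any_eq_true.mpr ⟨q, by simp [hq], hqt⟩
  · intro h
    rcases pv_subsumed parts methods pvThreatMethods (by decide)
      (by rw [hP]; intro z hz; simp [hz]) h with ⟨q, hq, hqt⟩
    exact List.any_eq_true.mpr ⟨q, by simp [hq], hqt⟩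
  · intro h
    rcases pv_subsumed parts circumstances pvThreatCircumstances (by decide)
      (by rw [hP]; intro z hz; simp [hz]) h with ⟨q, hq, hqt⟩
    exact List.any_eq_true.mpr ⟨q, by simp [hq], hqt⟩
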